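-- pv_equiv track=rewrite | github.com/jzambre03/gcpv1 | Agents/workers/certification/confidence_scorer.py | _calculate_policy_deductions
-- ===== SOURCE A (Python) =====
-- from typing import Dict, Any, List, Optional
--
-- def _calculate_policy_deductions(violations: List[Dict[str, Any]]) -> int:
--     """Calculate deductions for policy violations"""
--     deduction = 0
--
--     for violation in violations:
--         severity = violation.get('severity', 'medium').lower()
--         if severity == 'critical':
--             deduction += 30
--         elif severity == 'high':
--             deduction += 15
--         elif severity == 'medium':
--             deduction += 5
--
--     return deduction
-- ===== SOURCE B (Python) =====
-- def _calculate_policy_deductions(violations):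
--     counts = {}
--     for v in violations:
--         s = v.get('severity', 'medium').lower()
--         counts[s] = counts.get(s, 0) + 1
--     return (counts.get('critical', 0) * 30
--             + counts.get('high', 0) * 15
--             + counts.get('medium', 0) * 5)
-- ===== Notes on version B (the rewrite author's own statement) =====
-- stated objective: alternative
-- what changed: Replaces the single accumulate-as-you-go if/elif chain by a two-phase computation: first build a frequency table of lowercased severities, then return a closed-form weighted sum counts['critical']*30 + counts['high']*15 + counts['medium']*5.
import Mathlib
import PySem

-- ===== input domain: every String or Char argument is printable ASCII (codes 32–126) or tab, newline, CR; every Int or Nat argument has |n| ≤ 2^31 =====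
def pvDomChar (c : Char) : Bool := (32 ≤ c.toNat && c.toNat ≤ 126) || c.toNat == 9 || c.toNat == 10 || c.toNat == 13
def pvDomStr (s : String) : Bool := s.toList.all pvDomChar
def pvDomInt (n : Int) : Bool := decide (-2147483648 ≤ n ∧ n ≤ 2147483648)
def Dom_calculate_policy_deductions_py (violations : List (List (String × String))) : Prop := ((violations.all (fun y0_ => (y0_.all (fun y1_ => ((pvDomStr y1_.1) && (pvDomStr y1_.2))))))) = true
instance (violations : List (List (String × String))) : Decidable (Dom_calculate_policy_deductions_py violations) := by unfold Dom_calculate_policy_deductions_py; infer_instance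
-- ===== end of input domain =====

-- ===== PORT A =====
-- one honest line: B separates tabulation (a counter of lowercased severities) from a fixed weighted sum; alternative decomposition, same cost.
def calculate_policy_deductions_py (violations : List (List (String × String))) : Int :=
  violations.foldl (fun deduction violation =>
    let severity := PySem.Str.lower ((PySem.Dict.ofList violation).getD "severity" "medium")
    if severity == "critical" then deduction + 30
    else if severity == "high" then deduction + 15
    else if severity == "medium" then deduction + 5
    else deduction) 0

-- ===== PORT B =====
def calculate_policy_deductions_py_alt (violations : List (List (String × String))) : Int :=
  let counts : PySem.Dict String Int :=
    violations.foldl (fun counts violation =>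
      let s := PySem.Str.lower ((PySem.Dict.ofList violation).getD "severity" "medium")
      counts.insert s (counts.getD s 0 + 1)) PySem.Dict.empty
  counts.getD "critical" 0 * 30 + counts.getD "high" 0 * 15 + counts.getD "medium" 0 * 5

-- ===== PRECONDITION & SPEC =====
def Spec_calculate_policy_deductions_py (violations : List (List (String × String))) (out : Int) : Prop := out = calculate_policy_deductions_py_alt violations
instance (violations : List (List (String × String))) (out : Int) : Decidable (Spec_calculate_policy_deductions_py violations out) := by unfold Spec_calculate_policy_deductions_py; infer_instance

-- ===== CLAIM (what is proved, stated in full; the proofs are below) =====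
def Claim_equal_calculate_policy_deductions_py : Prop := ∀ (violations : List (List (String × String))), Dom_calculate_policy_deductions_py violations → Spec_calculate_policy_deductions_py violations (calculate_policy_deductions_py violations)

-- ===== LEMMAS AND PROOFS =====

-- ===== VERDICT (by name: the statement is the Claim_ definition above) =====
-- sev: the lowercased severity a loop iteration extracts
def pvSev (violation : List (String × String)) : String :=
  PySem.Str.lower ((PySem.Dict.ofList violation).getD "severity" "medium")

lemma pvA_foldl (l : List (List (String × String))) (acc : Int) :
    l.foldl (fun deduction violation =>
      let severity := pvSev violation
      if severity == "critical" then deduction + 30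
      else if severity == "high" then deduction + 15
      else if severity == "medium" then deduction + 5
      else deduction) acc
    = acc + ((l.map pvSev).count "critical" : Int) * 30
          + ((l.map pvSev).count "high" : Int) * 15
          + ((l.map pvSev).count "medium" : Int) * 5 := by
  induction l generalizing acc with
  | nil => simp
  | cons v t ih =>
    simp only [List.foldl_cons, List.map_cons, ih]
    by_cases h1 : pvSev v == "critical"
    · simp only [List.count_cons, h1]
      have h2 : (pvSev v == "high") = false := by
        simp_all [beq_iff_eq]
      have h3 : (pvSev v == "medium") = false := by
        simp_all [beq_iff_eq]
      simp [h2, h3]; ring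
    · by_cases h2 : pvSev v == "high"
      · have h3 : (pvSev v == "medium") = false := by simp_all [beq_iff_eq]
        simp [h1, h2, h3, List.count_cons]; ring
      · by_cases h3 : pvSev v == "medium"
        · simp [h1, h2, h3, List.count_cons]; ring
        · simp [h1, h2, h3, List.count_cons]

lemma pvB_counts (violations : List (List (String × String))) (s : String) :
    (violations.foldl (fun (counts : PySem.Dict String Int) violation =>
        counts.insert (pvSev violation) (counts.getD (pvSev violation) 0 + 1))
      PySem.Dict.empty).getD s 0
    = ((violations.map pvSev).count s : Int) := by
  rw [← List.foldl_map (f := pvSev)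
        (g := fun (counts : PySem.Dict String Int) s => counts.insert s (counts.getD s 0 + 1))]
  simp [PySem.Dict.getD_foldl_insert_add_one]

theorem calculate_policy_deductions_py_spec : Claim_equal_calculate_policy_deductions_py := by
  intro violations _
  show calculate_policy_deductions_py violations = calculate_policy_deductions_py_alt violations
  have hA : calculate_policy_deductions_py violations
      = violations.foldl (fun deduction violation =>
          let severity := pvSev violation
          if severity == "critical" then deduction + 30
          else if severity == "high" then deduction + 15
          else if severity == "medium" then deduction + 5
          else deduction) 0 := rfl
  have hB : calculate_policy_deductions_py_alt violations
      = (violations.foldl (fun (counts : PySem.Dict String Int) violation =>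
            counts.insert (pvSev violation) (counts.getD (pvSev violation) 0 + 1))
          PySem.Dict.empty).getD "critical" 0 * 30
        + (violations.foldl (fun (counts : PySem.Dict String Int) violation =>
            counts.insert (pvSev violation) (counts.getD (pvSev violation) 0 + 1))
          PySem.Dict.empty).getD "high" 0 * 15
        + (violations.foldl (fun (counts : PySem.Dict String Int) violation =>
            counts.insert (pvSev violation) (counts.getD (pvSev violation) 0 + 1))
          PySem.Dict.empty).getD "medium" 0 * 5 := rfl
  rw [hA, hB, pvA_foldl, pvB_counts, pvB_counts, pvB_counts]
  ring
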